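-- pv_equiv track=rewrite | github.com/TiagoAlvarezSchiaffino/CodeSignalArcade | SmoothSailing/commonCharacterCount.py | solution
-- ===== SOURCE A (Python) =====
-- def solution(s1, s2):
--     common_characters = 0
--     char_count_s1 = {}
--
--     for char in s1:
--         char_count_s1[char] = char_count_s1.get(char, 0) + 1
--
--     for char in s2:
--         if char in char_count_s1 and char_count_s1[char] > 0:
--             common_characters += 1
--             char_count_s1[char] -= 1
--
--     return common_characters
-- ===== SOURCE B (Python) =====
-- def solution(s1, s2):
--     chars1 = list(s1)
--     chars2 = list(s2)
--     return sum(min(chars1.count(ch), chars2.count(ch)) for ch in set(chars1))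
-- ===== Notes on version B (the rewrite author's own statement) =====
-- stated objective: simpler
-- what changed: Replaces A's two loops (build a count dict from s1, then scan s2 char-by-char decrementing) with a single sum over the distinct characters of s1 of min(count in s1, count in s2).
import Mathlib
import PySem

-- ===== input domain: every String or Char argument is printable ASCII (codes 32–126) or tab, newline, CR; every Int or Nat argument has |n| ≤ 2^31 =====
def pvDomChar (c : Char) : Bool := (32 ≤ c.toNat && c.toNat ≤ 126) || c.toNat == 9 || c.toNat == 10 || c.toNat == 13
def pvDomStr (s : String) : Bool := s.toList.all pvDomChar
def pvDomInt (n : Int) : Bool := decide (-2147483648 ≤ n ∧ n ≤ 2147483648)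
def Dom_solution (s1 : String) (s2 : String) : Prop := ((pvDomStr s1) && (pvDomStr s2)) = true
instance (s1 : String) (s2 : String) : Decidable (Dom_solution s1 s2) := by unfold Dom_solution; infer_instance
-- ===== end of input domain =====

-- B replaces A's build-dict-then-scan-and-decrement loops by a one-line sum of
-- min(count in s1, count in s2) over the distinct characters of s1 (simpler, same result).

-- ===== PORT A =====
def solution (s1 : String) (s2 : String) : Int :=
  let charCount : PySem.Dict Char Int :=
    s1.toList.foldl (fun d ch => d.insert ch (d.getD ch 0 + 1)) PySem.Dict.empty
  let final : Int × PySem.Dict Char Int :=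
    s2.toList.foldl
      (fun st ch =>
        if st.2.contains ch ∧ 0 < st.2.getD ch 0 then
          (st.1 + 1, st.2.insert ch (st.2.getD ch 0 - 1))
        else st)
      (0, charCount)
  final.1

-- ===== PORT B =====
def solution_alt (s1 : String) (s2 : String) : Int :=
  let chars1 := s1.toList
  let chars2 := s2.toList
  ((PySem.Set.ofList chars1).map
    (fun ch => min ((PySem.List.count chars1 ch : Nat) : Int) ((PySem.List.count chars2 ch : Nat) : Int))).sum

-- ===== PRECONDITION & SPEC =====
def Spec_solution (s1 : String) (s2 : String) (out : Int) : Prop := out = solution_alt s1 s2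
instance (s1 : String) (s2 : String) (out : Int) : Decidable (Spec_solution s1 s2 out) := by unfold Spec_solution; infer_instance

-- ===== CLAIM (what is proved, stated in full; the proofs are below) =====
def Claim_equal_solution : Prop := ∀ (s1 : String) (s2 : String), Dom_solution s1 s2 → Spec_solution s1 s2 (solution s1 s2)

-- ===== LEMMAS AND PROOFS =====

-- the second loop of A computes Σ_{c ∈ distinct l} min(max(d[c],0), count l c)
theorem pv_loop2_eq (l : List Char) (acc : Int) (d : PySem.Dict Char Int) :
    (l.foldl
      (fun st ch =>
        if st.2.contains ch ∧ 0 < st.2.getD ch 0 then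
          (st.1 + 1, st.2.insert ch (st.2.getD ch 0 - 1))
        else st)
      (acc, d)).1
    = acc + ∑ c ∈ l.toFinset, min (max (d.getD c 0) 0) ((l.count c : Nat) : Int) := by
  induction l generalizing acc d with
  | nil => simp
  | cons x t ih =>
    simp only [List.foldl_cons]
    by_cases hc : d.contains x ∧ 0 < d.getD x 0
    · simp only [if_pos hc]
      rw [ih]
      have hx : 0 < d.getD x 0 := hc.2
      set d' := d.insert x (d.getD x 0 - 1) with hd'
      have hgetD' : ∀ c, d'.getD c 0 = if c = x then d.getD x 0 - 1 else d.getD c 0 := by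
        intro c; rw [hd', PySem.Dict.getD_insert]
      by_cases hxt : x ∈ t.toFinset
      · have h1 : ∑ c ∈ (x :: t).toFinset, min (max (d.getD c 0) 0) (((x :: t).count c : Nat) : Int)
            = min (max (d.getD x 0) 0) (((x :: t).count x : Nat) : Int)
              + ∑ c ∈ t.toFinset.erase x, min (max (d.getD c 0) 0) (((x :: t).count c : Nat) : Int) := by
          rw [List.toFinset_cons, Finset.insert_eq_self.mpr hxt]
          exact (Finset.add_sum_erase _ _ hxt).symm
        have h2 : ∑ c ∈ t.toFinset, min (max (d'.getD c 0) 0) ((t.count c : Nat) : Int)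
            = min (max (d'.getD x 0) 0) ((t.count x : Nat) : Int)
              + ∑ c ∈ t.toFinset.erase x, min (max (d'.getD c 0) 0) ((t.count c : Nat) : Int) :=
          (Finset.add_sum_erase _ _ hxt).symm
        have h3 : ∑ c ∈ t.toFinset.erase x, min (max (d.getD c 0) 0) (((x :: t).count c : Nat) : Int)
            = ∑ c ∈ t.toFinset.erase x, min (max (d'.getD c 0) 0) ((t.count c : Nat) : Int) := by
          apply Finset.sum_congr rfl
          intro c hce
          have hcx : c ≠ x := Finset.ne_of_mem_erase hce
          rw [hgetD' c, if_neg hcx]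
          simp [Ne.symm hcx]
        have h4 : min (max (d.getD x 0) 0) (((x :: t).count x : Nat) : Int)
            = 1 + min (max (d'.getD x 0) 0) ((t.count x : Nat) : Int) := by
          rw [hgetD' x, if_pos rfl, List.count_cons_self]
          push_cast
          omega
        rw [h1, h2, h3, h4]; ring
      · have hcnt : t.count x = 0 := by
          rw [List.count_eq_zero]; simpa using hxt
        have h1 : ∑ c ∈ (x :: t).toFinset, min (max (d.getD c 0) 0) (((x :: t).count c : Nat) : Int)
            = min (max (d.getD x 0) 0) (((x :: t).count x : Nat) : Int)
              + ∑ c ∈ t.toFinset, min (max (d.getD c 0) 0) (((x :: t).count c : Nat) : Int) := by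
          rw [List.toFinset_cons, Finset.sum_insert hxt]
        have h3 : ∑ c ∈ t.toFinset, min (max (d.getD c 0) 0) (((x :: t).count c : Nat) : Int)
            = ∑ c ∈ t.toFinset, min (max (d'.getD c 0) 0) ((t.count c : Nat) : Int) := by
          apply Finset.sum_congr rfl
          intro c hce
          have hcx : c ≠ x := by rintro rfl; exact hxt hce
          rw [hgetD' c, if_neg hcx]
          simp [Ne.symm hcx]
        have h4 : min (max (d.getD x 0) 0) (((x :: t).count x : Nat) : Int) = 1 := by
          rw [List.count_cons_self, hcnt]
          push_cast
          omega
        rw [h1, h3, h4]; ring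
    · simp only [if_neg hc]
      rw [ih]
      have hle : d.getD x 0 ≤ 0 := by
        by_cases hco : d.contains x
        · by_contra hgt; exact hc ⟨hco, by omega⟩
        · rw [PySem.Dict.getD_of_not_contains (h := by simpa using hco)]
      congr 1
      by_cases hxt : x ∈ t.toFinset
      · rw [List.toFinset_cons, Finset.insert_eq_self.mpr hxt]
        apply Finset.sum_congr rfl
        intro c hce
        by_cases hcx : c = x
        · subst hcx
          rw [List.count_cons_self]
          push_cast
          omega
        · simp [Ne.symm hcx]
      · rw [List.toFinset_cons, Finset.sum_insert hxt]
        have hx0 : min (max (d.getD x 0) 0) (((x :: t).count x : Nat) : Int) = 0 := by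
          omega
        rw [hx0, zero_add]
        apply Finset.sum_congr rfl
        intro c hce
        have hcx : c ≠ x := by rintro rfl; exact hxt hce
        simp [Ne.symm hcx]

-- the sum may equivalently range over the distinct characters of either string
theorem pv_sum_swap (l1 l2 : List Char) :
    (∑ c ∈ l2.toFinset, min ((l1.count c : Nat) : Int) ((l2.count c : Nat) : Int))
    = ∑ c ∈ l1.toFinset, min ((l1.count c : Nat) : Int) ((l2.count c : Nat) : Int) := by
  rw [Finset.sum_subset (Finset.subset_union_right (s₁ := l1.toFinset) (s₂ := l2.toFinset))
      (fun c _ hc2 => by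
        have h0 : l2.count c = 0 := by rw [List.count_eq_zero]; simpa using hc2
        rw [h0]; push_cast; omega)]
  rw [Finset.sum_subset (Finset.subset_union_left (s₁ := l1.toFinset) (s₂ := l2.toFinset))
      (fun c _ hc1 => by
        have h0 : l1.count c = 0 := by rw [List.count_eq_zero]; simpa using hc1
        rw [h0]; push_cast; omega)]

-- ===== VERDICT (by name: the statement is the Claim_ definition above) =====
theorem solution_spec : Claim_equal_solution := by
  intro s1 s2 _
  unfold Spec_solution solution solution_alt
  simp only []
  rw [pv_loop2_eq]
  have hcount : ∀ c, ((s1.toList.foldl (fun d ch => d.insert ch (d.getD ch 0 + 1)) PySem.Dict.empty).getD c 0)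
      = (s1.toList.count c : Int) := by
    intro c
    rw [PySem.Dict.getD_foldl_insert_add_one]
    simp [PySem.Dict.getD_empty]
  have hB : ((PySem.Set.ofList s1.toList).map
      (fun ch => min ((PySem.List.count s1.toList ch : Nat) : Int) ((PySem.List.count s2.toList ch : Nat) : Int))).sum
      = ∑ c ∈ s1.toList.toFinset, min ((s1.toList.count c : Nat) : Int) ((s2.toList.count c : Nat) : Int) := by
    rw [← List.sum_toFinset _ (by
      rw [← PySem.List.dedup_eq_ofList]; exact PySem.List.nodup_dedup s1.toList)]
    rw [← PySem.List.dedup_eq_ofList]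
    have hfs : (PySem.List.dedup s1.toList).toFinset = s1.toList.toFinset := by
      apply Finset.ext
      intro c
      simp
    rw [hfs]
    simp [PySem.List.count_eq]
  rw [hB, ← pv_sum_swap, zero_add]
  apply Finset.sum_congr rfl
  intro c _
  rw [hcount c]
  congr 1
  omega
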